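-- pv_equiv track=rewrite | github.com/COHRINT/cops_and_robots | src/cops_and_robots/human_tools/template_description_clauses.py | split_phrases
-- ===== SOURCE A (Python) =====
-- def split_phrases(tagged_document):
--     """Identify individual phrases in a tagged document"""
--     phrases = []
--     phrase = []
--     for tagged_phrase in tagged_document:
--         if tagged_phrase[0] not in ['.', '!', '?']:
--             phrase.append(tagged_phrase)
--         else:
--             phrases.append(phrase)
--             phrase = []
--     return phrases
-- ===== SOURCE B (Python) =====
-- def split_phrases(tagged_document):
--     """Identify individual phrases in a tagged document"""
--     cuts = [i for i, tp in enumerate(tagged_document) if tp[0] in ['.', '!', '?']]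
--     phrases = []
--     start = 0
--     for c in cuts:
--         phrases.append(tagged_document[start:c])
--         start = c + 1
--     return phrases
-- ===== Notes on version B (the rewrite author's own statement) =====
-- stated objective: alternative
-- what changed: B first collects the cut indices (positions of '.'/'!'/'?' tags) in one pass, then builds each phrase by slicing the document between consecutive cuts, instead of A's single pass that grows a running accumulator phrase and flushes it on punctuation.
import Mathlib
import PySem

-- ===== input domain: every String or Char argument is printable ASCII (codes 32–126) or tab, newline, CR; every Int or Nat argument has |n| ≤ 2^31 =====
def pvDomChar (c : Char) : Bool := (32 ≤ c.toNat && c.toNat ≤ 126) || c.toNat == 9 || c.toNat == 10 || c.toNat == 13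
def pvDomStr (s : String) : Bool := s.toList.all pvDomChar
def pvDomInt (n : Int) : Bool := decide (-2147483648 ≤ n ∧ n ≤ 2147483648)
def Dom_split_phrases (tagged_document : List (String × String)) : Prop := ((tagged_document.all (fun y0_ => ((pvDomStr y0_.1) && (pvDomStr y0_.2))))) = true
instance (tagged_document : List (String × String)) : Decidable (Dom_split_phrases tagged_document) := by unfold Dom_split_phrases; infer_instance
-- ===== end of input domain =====

-- B collects the cut indices first and slices between them instead of A's running accumulator; same cost, different decomposition.

-- ===== PORT A =====
def split_phrases (tagged_document : List (String × String)) : List (List (String × String)) :=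
  let st := tagged_document.foldl
    (fun (st : List (List (String × String)) × List (String × String)) tagged_phrase =>
      if !((["." , "!", "?"] : List String).contains tagged_phrase.1) then
        (st.1, st.2 ++ [tagged_phrase])
      else
        (st.1 ++ [st.2], []))
    ([], [])
  st.1

-- ===== PORT B =====
def split_phrases_alt (tagged_document : List (String × String)) : List (List (String × String)) :=
  let cuts : List Int := (PySem.List.enumerate tagged_document 0).filterMap
    (fun p => if (["." , "!", "?"] : List String).contains p.2.1 then some p.1 else none)
  let st := cuts.foldl
    (fun (st : List (List (String × String)) × Int) c =>
      (st.1 ++ [PySem.List.slice tagged_document (some st.2) (some c)], c + 1))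
    ([], 0)
  st.1

-- ===== PRECONDITION & SPEC =====
def Spec_split_phrases (tagged_document : List (String × String)) (out : List (List (String × String))) : Prop := out = split_phrases_alt tagged_document
instance (tagged_document : List (String × String)) (out : List (List (String × String))) : Decidable (Spec_split_phrases tagged_document out) := by unfold Spec_split_phrases; infer_instance

-- ===== CLAIM (what is proved, stated in full; the proofs are below) =====
def Claim_equal_split_phrases : Prop := ∀ (tagged_document : List (String × String)), Dom_split_phrases tagged_document → Spec_split_phrases tagged_document (split_phrases tagged_document)

-- ===== LEMMAS AND PROOFS =====

/-- reference decomposition: phrases between punctuation marks, trailing segment dropped -/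
def pvChunks : List (String × String) → List (List (String × String))
  | [] => []
  | x :: xs =>
    if (["." , "!", "?"] : List String).contains x.1 then
      [] :: pvChunks xs
    else
      match pvChunks xs with
      | [] => []
      | c :: cs => (x :: c) :: cs

def pvMerge (pre : List (String × String)) : List (List (String × String)) → List (List (String × String))
  | [] => []
  | c :: cs => (pre ++ c) :: cs

lemma pvA_fold (xs : List (String × String)) :
    ∀ (ps : List (List (String × String))) (ph : List (String × String)),
      (xs.foldl
        (fun (st : List (List (String × String)) × List (String × String)) tagged_phrase =>
          if !((["." , "!", "?"] : List String).contains tagged_phrase.1) then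
            (st.1, st.2 ++ [tagged_phrase])
          else
            (st.1 ++ [st.2], []))
        (ps, ph)).1 = ps ++ pvMerge ph (pvChunks xs) := by
  induction xs with
  | nil => intro ps ph; simp [pvMerge, pvChunks]
  | cons x xs ih =>
    intro ps ph
    cases h : (["." , "!", "?"] : List String).contains x.1
    · simp only [List.foldl_cons, h, Bool.not_false, if_true, ih]
      simp only [pvChunks, h, Bool.false_eq_true, if_false]
      cases pvChunks xs <;> simp [pvMerge]
    · simp only [List.foldl_cons, h, Bool.not_true, Bool.false_eq_true, if_false, ih]
      simp only [pvChunks, h, if_true]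
      cases pvChunks xs <;> simp [pvMerge]

lemma pvB_fold (xs : List (String × String)) :
    ∀ (P : List (String × String)) (s : Nat) (acc : List (List (String × String))),
      s ≤ P.length →
      ((((PySem.List.enumerate xs (P.length : Int)).filterMap
          (fun p => if (["." , "!", "?"] : List String).contains p.2.1 then some p.1 else none)).foldl
        (fun (st : List (List (String × String)) × Int) c =>
          (st.1 ++ [PySem.List.slice (P ++ xs) (some st.2) (some c)], c + 1))
        (acc, (s : Int))).1)
      = acc ++ pvMerge (P.drop s) (pvChunks xs) := by
  induction xs with
  | nil => intro P s acc _; simp [PySem.List.enumerate, pvChunks, pvMerge]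
  | cons x xs ih =>
    intro P s acc hs
    rw [PySem.List.enumerate_cons]
    have hP : ((P.length : Int) + 1) = (((P ++ [x]).length : Nat) : Int) := by
      simp
    have harr : P ++ x :: xs = (P ++ [x]) ++ xs := by simp
    cases h : (["." , "!", "?"] : List String).contains x.1
    · -- x is not a cut; current phrase keeps growing
      simp only [List.filterMap_cons, h, Bool.false_eq_true, if_false]
      rw [hP, harr]
      rw [ih (P ++ [x]) s acc (by rw [List.length_append]; omega)]
      have hdrop : (P ++ [x]).drop s = P.drop s ++ [x] := by
        rw [List.drop_append_of_le_length hs]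
      rw [hdrop]
      simp only [pvChunks, h, Bool.false_eq_true, if_false]
      cases pvChunks xs <;> simp [pvMerge]
    · -- x is a cut at index P.length
      have hslice : PySem.List.slice (P ++ x :: xs) (some (s : Int)) (some (P.length : Int))
          = P.drop s := by
        rw [PySem.List.slice_natCast]
        rw [List.drop_append_of_le_length hs]
        have hlen : (P.drop s).length = P.length - s := by simp
        exact List.take_left' hlen
      simp only [List.filterMap_cons, h, if_true, List.foldl_cons, hslice]
      rw [hP, harr]
      rw [ih (P ++ [x]) ((P ++ [x]).length) (acc ++ [P.drop s]) (le_refl _)]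
      have hdrop : (P ++ [x]).drop (P ++ [x]).length = ([] : List (String × String)) := by
        simp
      rw [hdrop]
      simp only [pvChunks, h, if_true]
      cases pvChunks xs <;> simp [pvMerge]

-- ===== VERDICT (by name: the statement is the Claim_ definition above) =====
theorem split_phrases_spec : Claim_equal_split_phrases := by
  intro doc _
  unfold Spec_split_phrases split_phrases split_phrases_alt
  have hb := pvB_fold doc [] 0 [] (by simp)
  simp only [List.length_nil, Nat.cast_zero, List.nil_append, List.drop_nil] at hb
  rw [hb, pvA_fold doc [] []]
  cases pvChunks doc <;> simp [pvMerge]
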